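-- pv_equiv track=rewrite | github.com/abhisharma7/pyalgo | array/even_odd_array.py | simple_even_odd
-- ===== SOURCE A (Python) =====
-- def simple_even_odd(A):
--     ls = []
--     for i in A:
--         if i % 2 == 0:
--             ls.insert(0, i)
--         else:
--             ls.append(i)
--     return ls
-- ===== SOURCE B (Python) =====
-- def simple_even_odd(A):
--     e = 0
--     for x in A:
--         if x % 2 == 0:
--             e += 1
--     res = [None] * len(A)
--     d = e - 1
--     a = e
--     for x in A:
--         if x % 2 == 0:
--             res[d] = x
--             d -= 1
--         else:
--             res[a] = x
--             a += 1
--     return res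
-- ===== Notes on version B (the rewrite author's own statement) =====
-- stated objective: alternative
-- what changed: Replaces the loop that list.insert(0, ...)s each even element (shifting the list every time) by a count-then-place scheme: count the evens, preallocate the result, and write each element once via two index cursors (descending for evens, ascending for odds).
import Mathlib
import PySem

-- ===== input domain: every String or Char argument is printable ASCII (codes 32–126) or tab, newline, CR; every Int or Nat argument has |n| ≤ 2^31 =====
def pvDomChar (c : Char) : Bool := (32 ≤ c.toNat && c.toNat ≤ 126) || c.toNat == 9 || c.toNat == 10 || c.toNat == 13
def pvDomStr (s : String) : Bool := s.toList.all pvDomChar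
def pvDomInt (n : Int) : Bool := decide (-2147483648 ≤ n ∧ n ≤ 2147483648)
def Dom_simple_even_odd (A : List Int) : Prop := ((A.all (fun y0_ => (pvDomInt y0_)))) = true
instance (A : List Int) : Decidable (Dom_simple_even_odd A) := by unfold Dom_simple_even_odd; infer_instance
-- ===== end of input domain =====

-- B counts the evens first and writes every element once into a preallocated list via two
-- index cursors (descending for evens, ascending for odds), an alternative to A's repeated
-- list.insert(0, ...) front-insertions.

-- ===== PORT A =====
-- ls.insert(0, i) prepends (PySem.List.insert at 0); ls.append(i) appends.
def simple_even_odd (A : List Int) : List Int :=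
  A.foldl (fun ls i => if PySem.Int.mod i 2 == 0 then PySem.List.insert ls 0 i else ls ++ [i]) []

-- ===== PORT B =====
-- res[d] = x / res[a] = x : the cursors are always non-negative and in range (proved below),
-- so List.set at .toNat is exact; the [None]*n placeholders (all overwritten) are modelled by 0s.
def simple_even_odd_alt (A : List Int) : List Int :=
  let e : Int := A.foldl (fun e x => if PySem.Int.mod x 2 == 0 then e + 1 else e) 0
  let res : List Int := List.replicate A.length 0
  (A.foldl (fun (s : List Int × Int × Int) x =>
      if PySem.Int.mod x 2 == 0 then (s.1.set s.2.1.toNat x, s.2.1 - 1, s.2.2)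
      else (s.1.set s.2.2.toNat x, s.2.1, s.2.2 + 1))
    (res, e - 1, e)).1

-- ===== PRECONDITION & SPEC =====
def Spec_simple_even_odd (A : List Int) (out : List Int) : Prop := out = simple_even_odd_alt A
instance (A : List Int) (out : List Int) : Decidable (Spec_simple_even_odd A out) := by unfold Spec_simple_even_odd; infer_instance

-- ===== CLAIM (what is proved, stated in full; the proofs are below) =====
def Claim_equal_simple_even_odd : Prop := ∀ (A : List Int), Dom_simple_even_odd A → Spec_simple_even_odd A (simple_even_odd A)

-- ===== LEMMAS AND PROOFS =====

def pvEvenB (x : Int) : Bool := PySem.Int.mod x 2 == 0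

-- A's loop: prepend-evens / append-odds accumulates reversed evens in front, odds behind.
theorem pvFoldA_spec : ∀ (xs ls : List Int),
    xs.foldl (fun ls i => if PySem.Int.mod i 2 == 0 then PySem.List.insert ls 0 i else ls ++ [i]) ls
      = (xs.filter pvEvenB).reverse ++ ls ++ xs.filter (fun x => !pvEvenB x) := by
  intro xs
  induction xs with
  | nil => intro ls; simp
  | cons x xs ih =>
    intro ls
    simp only [List.foldl_cons]
    by_cases h : (PySem.Int.mod x 2 == 0) = true
    · rw [if_pos h, ih, PySem.List.insert_zero]
      have h' : pvEvenB x = true := h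
      rw [List.filter_cons, List.filter_cons, if_pos h', if_neg (by simp [h'])]
      simp
    · rw [if_neg h, ih]
      have h' : pvEvenB x = false := by simp only [pvEvenB]; simpa using h
      rw [List.filter_cons, List.filter_cons, if_neg (by simp [h']), if_pos (by simp [h'])]
      simp

theorem pvCount_spec : ∀ (xs : List Int) (c : Int),
    xs.foldl (fun e x => if PySem.Int.mod x 2 == 0 then e + 1 else e) c
      = c + ((xs.filter pvEvenB).length : Int) := by
  intro xs
  induction xs with
  | nil => intro c; simp
  | cons x xs ih =>
    intro c
    simp only [List.foldl_cons]
    by_cases h : (PySem.Int.mod x 2 == 0) = true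
    · rw [if_pos h, ih]
      have h' : pvEvenB x = true := h
      rw [List.filter_cons, if_pos h']
      simp only [List.length_cons]
      push_cast; ring
    · rw [if_neg h, ih]
      have h' : pvEvenB x = false := by simp only [pvEvenB]; simpa using h
      rw [List.filter_cons, if_neg (by simp [h'])]

theorem pvSet_mid : ∀ (L1 : List Int) (y x : Int) (L2 : List Int),
    (L1 ++ y :: L2).set L1.length x = L1 ++ x :: L2 := by
  intro L1
  induction L1 with
  | nil => intro y x L2; simp
  | cons a L1 ih => intro y x L2; simp [ih]

-- Invariant for B's fill loop: the untouched slots are two replicate blocks around the gap M.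
theorem pvFill_spec : ∀ (xs P M S : List Int),
    (xs.foldl (fun (s : List Int × Int × Int) x =>
        if PySem.Int.mod x 2 == 0 then (s.1.set s.2.1.toNat x, s.2.1 - 1, s.2.2)
        else (s.1.set s.2.2.toNat x, s.2.1, s.2.2 + 1))
      (P ++ List.replicate (xs.filter pvEvenB).length 0 ++ M
         ++ List.replicate (xs.filter (fun x => !pvEvenB x)).length 0 ++ S,
       (P.length : Int) + (xs.filter pvEvenB).length - 1,
       (P.length : Int) + (xs.filter pvEvenB).length + M.length)).1
    = P ++ (xs.filter pvEvenB).reverse ++ M ++ xs.filter (fun x => !pvEvenB x) ++ S := by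
  intro xs
  induction xs with
  | nil => intro P M S; simp
  | cons x xs ih =>
    intro P M S
    by_cases h : (PySem.Int.mod x 2 == 0) = true
    · have h' : pvEvenB x = true := h
      have hf : List.filter pvEvenB (x :: xs) = x :: List.filter pvEvenB xs := by
        rw [List.filter_cons, if_pos h']
      have hg : List.filter (fun y => !pvEvenB y) (x :: xs) = List.filter (fun y => !pvEvenB y) xs := by
        rw [List.filter_cons, if_neg (by simp [h'])]
      rw [hf, hg, List.foldl_cons, if_pos h]
      dsimp only
      have hset :
          ((P ++ List.replicate (x :: List.filter pvEvenB xs).length 0 ++ M ++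
              List.replicate (List.filter (fun y => !pvEvenB y) xs).length 0 ++ S).set
            ((P.length : Int) + ((x :: List.filter pvEvenB xs).length : Int) - 1).toNat x)
          = P ++ List.replicate (List.filter pvEvenB xs).length 0 ++ (x :: M) ++
              List.replicate (List.filter (fun y => !pvEvenB y) xs).length 0 ++ S := by
        have hidx : ((P.length : Int) + ((x :: List.filter pvEvenB xs).length : Int) - 1).toNat
            = (P ++ List.replicate (List.filter pvEvenB xs).length 0).length := by
          simp [List.length_cons]; omega
        rw [hidx, List.length_cons, List.replicate_succ']
        have := pvSet_mid (P ++ List.replicate (List.filter pvEvenB xs).length 0) 0 x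
            (M ++ List.replicate (List.filter (fun y => !pvEvenB y) xs).length 0 ++ S)
        simp only [List.append_assoc] at this ⊢
        simpa using this
      have e1 : ((P.length : Int) + ((x :: List.filter pvEvenB xs).length : Int) - 1) - 1
          = (P.length : Int) + ((List.filter pvEvenB xs).length : Int) - 1 := by
        push_cast [List.length_cons]; ring
      have e2 : ((P.length : Int) + ((x :: List.filter pvEvenB xs).length : Int) + (M.length : Int))
          = (P.length : Int) + ((List.filter pvEvenB xs).length : Int) + (((x :: M).length : Int)) := by
        push_cast [List.length_cons]; ring
      rw [hset, e1, e2, ih P (x :: M) S]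
      simp
    · have h' : pvEvenB x = false := by simp only [pvEvenB]; simpa using h
      have hf : List.filter pvEvenB (x :: xs) = List.filter pvEvenB xs := by
        rw [List.filter_cons, if_neg (by simp [h'])]
      have hg : List.filter (fun y => !pvEvenB y) (x :: xs) = x :: List.filter (fun y => !pvEvenB y) xs := by
        rw [List.filter_cons, if_pos (by simp [h'])]
      rw [hf, hg, List.foldl_cons, if_neg h]
      dsimp only
      have hset :
          ((P ++ List.replicate (List.filter pvEvenB xs).length 0 ++ M ++
              List.replicate (x :: List.filter (fun y => !pvEvenB y) xs).length 0 ++ S).set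
            ((P.length : Int) + ((List.filter pvEvenB xs).length : Int) + (M.length : Int)).toNat x)
          = P ++ List.replicate (List.filter pvEvenB xs).length 0 ++ (M ++ [x]) ++
              List.replicate (List.filter (fun y => !pvEvenB y) xs).length 0 ++ S := by
        have hidx : ((P.length : Int) + ((List.filter pvEvenB xs).length : Int) + (M.length : Int)).toNat
            = (P ++ List.replicate (List.filter pvEvenB xs).length 0 ++ M).length := by
          simp; omega
        rw [hidx, List.length_cons, List.replicate_succ]
        have := pvSet_mid (P ++ List.replicate (List.filter pvEvenB xs).length 0 ++ M) 0 x
            (List.replicate (List.filter (fun y => !pvEvenB y) xs).length 0 ++ S)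
        simp only [List.append_assoc] at this ⊢
        simpa using this
      have e2 : ((P.length : Int) + ((List.filter pvEvenB xs).length : Int) + (M.length : Int)) + 1
          = (P.length : Int) + ((List.filter pvEvenB xs).length : Int) + (((M ++ [x]).length : Int)) := by
        simp; omega
      rw [hset, e2, ih P (M ++ [x]) S]
      simp

-- ===== VERDICT (by name: the statement is the Claim_ definition above) =====
theorem simple_even_odd_spec : Claim_equal_simple_even_odd := by
  intro A _
  show simple_even_odd A = simple_even_odd_alt A
  simp only [simple_even_odd, simple_even_odd_alt]
  rw [pvFoldA_spec, pvCount_spec]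
  have hlen : A.length = (A.filter pvEvenB).length + (A.filter (fun x => !pvEvenB x)).length := by
    simpa using A.length_eq_length_filter_add pvEvenB
  rw [hlen, List.replicate_add]
  simpa using (pvFill_spec A [] [] []).symm
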